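-- pv_equiv track=rewrite | github.com/kari-coffee/BIO | bio2020q3.py | count_rep
-- ===== SOURCE A (Python) =====
-- def count_rep(cur, letter):
--     res = 0
--     for i in cur[::-1]:
--         if i == letter:
--             res += 1
--         else:
--             break
--     return res
-- ===== SOURCE B (Python) =====
-- def count_rep(cur, letter):
--     res = 0
--     for i in cur:
--         if i == letter:
--             res += 1
--         else:
--             res = 0
--     return res
-- ===== Notes on version B (the rewrite author's own statement) =====
-- stated objective: alternative
-- what changed: Replaces A's reverse-and-break scan with a single forward pass that increments a counter on a match and resets it to 0 on a mismatch; the final counter equals the trailing run length.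
import Mathlib
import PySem

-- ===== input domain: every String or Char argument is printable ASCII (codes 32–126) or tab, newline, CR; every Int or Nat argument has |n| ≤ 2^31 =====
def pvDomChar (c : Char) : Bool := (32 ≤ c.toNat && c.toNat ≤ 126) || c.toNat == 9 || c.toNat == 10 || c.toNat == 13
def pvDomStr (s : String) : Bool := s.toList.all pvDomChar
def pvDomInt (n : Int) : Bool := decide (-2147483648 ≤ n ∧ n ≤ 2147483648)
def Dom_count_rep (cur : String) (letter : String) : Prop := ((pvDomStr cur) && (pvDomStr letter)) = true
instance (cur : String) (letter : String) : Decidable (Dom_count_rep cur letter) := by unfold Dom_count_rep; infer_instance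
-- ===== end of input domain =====

-- B replaces A's reverse-scan-with-break by a single forward fold that resets its counter on a mismatch (alternative decomposition, same O(n) cost).


-- ===== PORT A =====
-- reverse loop with break: recursion over the reversed character list, accumulator res
def countRepRev (letter : String) : List Char → Int → Int
  | [], res => res
  | c :: rest, res =>
    if String.mk [c] = letter then countRepRev letter rest (res + 1) else res

def count_rep (cur : String) (letter : String) : Int :=
  countRepRev letter cur.toList.reverse 0

-- ===== PORT B =====
-- forward fold: increment on match, reset to 0 on mismatch
def count_rep_alt (cur : String) (letter : String) : Int :=
  cur.toList.foldl (fun res c => if String.mk [c] = letter then res + 1 else 0) 0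

-- ===== PRECONDITION & SPEC =====
def Spec_count_rep (cur : String) (letter : String) (out : Int) : Prop := out = count_rep_alt cur letter
instance (cur : String) (letter : String) (out : Int) : Decidable (Spec_count_rep cur letter out) := by unfold Spec_count_rep; infer_instance

-- ===== CLAIM (what is proved, stated in full; the proofs are below) =====
def Claim_equal_count_rep : Prop := ∀ (cur : String) (letter : String), Dom_count_rep cur letter → Spec_count_rep cur letter (count_rep cur letter)

-- ===== LEMMAS AND PROOFS =====
theorem countRepRev_shift (letter : String) (l : List Char) (a b : Int) :
    countRepRev letter l (a + b) = a + countRepRev letter l b := by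
  induction l generalizing b with
  | nil => rfl
  | cons c rest ih =>
    simp only [countRepRev]
    split
    · rw [add_assoc, ih]
    · rfl

theorem fold_eq_rev (letter : String) (l : List Char) :
    l.foldl (fun res c => if String.mk [c] = letter then res + 1 else 0) 0
      = countRepRev letter l.reverse 0 := by
  induction l using List.reverseRecOn with
  | nil => rfl
  | append_singleton l c ih =>
    rw [List.foldl_append, List.reverse_append]
    simp only [List.foldl, List.reverse_singleton, List.singleton_append, countRepRev]
    split
    · rw [ih, show (0 : Int) + 1 = 1 + 0 by ring, countRepRev_shift, add_comm]
    · rfl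

-- ===== VERDICT (by name: the statement is the Claim_ definition above) =====
theorem count_rep_spec : Claim_equal_count_rep := by
  intro cur letter _
  unfold Spec_count_rep count_rep count_rep_alt
  exact (fold_eq_rev letter cur.toList).symm
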